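-- pv_equiv track=rewrite | github.com/Dahemo76/pruebasdesoftware | A01793538_4_2/P3/word_count.py | word_repeat
-- ===== SOURCE A (Python) =====
-- def word_repeat(data):
--     """Funcion para encontrar palabras repetidas"""
--
--     unrepeated = []
--     occur = []
--
--     #Se itera sobre para obtener las repeticiones de los datos
--     for word in data:
--         if word not in unrepeated:
--             unrepeated.append(word)
--             occur.append(1)
--         else: occur[unrepeated.index(word)] += 1
--
--     return unrepeated,occur
-- ===== SOURCE B (Python) =====
-- def word_repeat(data):
--     """Funcion para encontrar palabras repetidas"""
--     items = list(data)
--     unrepeated = []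
--     for word in items:
--         if word not in unrepeated:
--             unrepeated.append(word)
--     occur = [items.count(word) for word in unrepeated]
--     return unrepeated, occur
-- ===== Notes on version B (the rewrite author's own statement) =====
-- stated objective: alternative
-- what changed: B replaces A's single pass maintaining a parallel count list (with list.index lookup and in-place increment) by two separate passes: one pass building the first-occurrence unique list only, then a counting pass computing occurrences with list.count per unique word.
import Mathlib
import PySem

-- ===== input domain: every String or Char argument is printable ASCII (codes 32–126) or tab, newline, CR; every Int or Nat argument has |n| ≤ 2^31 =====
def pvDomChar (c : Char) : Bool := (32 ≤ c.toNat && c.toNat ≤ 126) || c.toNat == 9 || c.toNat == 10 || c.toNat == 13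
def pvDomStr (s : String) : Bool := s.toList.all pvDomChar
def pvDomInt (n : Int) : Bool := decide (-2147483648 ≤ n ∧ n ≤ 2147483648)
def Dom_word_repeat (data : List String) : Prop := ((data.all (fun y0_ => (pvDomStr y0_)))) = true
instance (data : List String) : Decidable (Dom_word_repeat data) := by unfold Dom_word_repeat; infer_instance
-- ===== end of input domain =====

-- B splits A's single pass (parallel count list, index lookup, in-place increment)
-- into a dedup pass followed by a separate per-unique-word counting pass.


-- ===== PORT A =====
-- one loop step of A: append a new word with count 1, or increment at unrepeated.index(word)
def wrStep (st : List String × List Int) (word : String) : List String × List Int :=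
  if word ∉ st.1 then (st.1 ++ [word], st.2 ++ [1])
  else
    match PySem.List.index? st.1 word with
    | some i => (st.1, st.2.modify i (· + 1))
    | none => (st.1, st.2)  -- unreachable: word ∈ st.1

def word_repeat (data : List String) : List String × List Int :=
  data.foldl wrStep ([], [])

-- ===== PORT B =====
def word_repeat_alt (data : List String) : List String × List Int :=
  let items := data
  let unrepeated := items.foldl (fun acc word => if word ∉ acc then acc ++ [word] else acc) []
  (unrepeated, unrepeated.map (fun word => (PySem.List.count items word : Int)))

-- ===== PRECONDITION & SPEC =====
def Spec_word_repeat (data : List String) (out : List String × List Int) : Prop := out = word_repeat_alt data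
instance (data : List String) (out : List String × List Int) : Decidable (Spec_word_repeat data out) := by unfold Spec_word_repeat; infer_instance

-- ===== CLAIM (what is proved, stated in full; the proofs are below) =====
def Claim_equal_word_repeat : Prop := ∀ (data : List String), Dom_word_repeat data → Spec_word_repeat data (word_repeat data)

-- ===== LEMMAS AND PROOFS =====

-- incrementing the count list at the first index of w = counting against p ++ [w]
lemma wr_modify_count (w : String) : ∀ (u : List String) (p : List String) (i : Nat),
    u.Nodup → PySem.List.index? u w = some i →
    (u.map (fun x => (PySem.List.count p x : Int))).modify i (· + 1)
      = u.map (fun x => (PySem.List.count (p ++ [w]) x : Int)) := by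
  intro u
  induction u with
  | nil => intro p i _ h; simp [PySem.List.index?] at h
  | cons a t ih =>
    intro p i hnd hidx
    by_cases haw : w = a
    · subst haw
      simp [PySem.List.index?, List.idxOf?_cons] at hidx
      subst hidx
      simp [List.modify, PySem.List.count, List.count_append]
      intro x hx
      simp [List.count_eq_zero]
      rintro rfl
      exact (List.nodup_cons.mp hnd).1 hx
    · have hne : ¬ a = w := fun h => haw h.symm
      simp [PySem.List.index?, List.idxOf?_cons, hne] at hidx
      obtain ⟨j, hj, rfl⟩ := hidx
      simp [List.modify, PySem.List.count, List.count_append]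
      constructor
      · simp [List.count_eq_zero]; exact fun h => haw h.symm
      · have := ih p j (List.nodup_cons.mp hnd).2 (by simp [PySem.List.index?, hj])
        simpa [PySem.List.count, List.count_append, List.modify] using this

-- loop invariant: A's state is (unique list, occurrence counts of the processed prefix p)
lemma wr_loop (rest : List String) : ∀ (u p : List String),
    u.Nodup → (∀ x, x ∈ p → x ∈ u) →
    rest.foldl wrStep (u, u.map (fun x => (PySem.List.count p x : Int))) =
      ((rest.foldl (fun acc word => if word ∉ acc then acc ++ [word] else acc) u),
       (rest.foldl (fun acc word => if word ∉ acc then acc ++ [word] else acc) u).map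
         (fun x => (PySem.List.count (p ++ rest) x : Int))) := by
  induction rest with
  | nil => intro u p _ _; simp
  | cons w rest ih =>
    intro u p hnd hsub
    by_cases hw : w ∈ u
    · obtain ⟨i, hi⟩ := Option.isSome_iff_exists.mp (List.isSome_idxOf?.mpr hw)
      have hi' : PySem.List.index? u w = some i := by simpa [PySem.List.index?] using hi
      have hstep : wrStep (u, u.map (fun x => (PySem.List.count p x : Int))) w
          = (u, u.map (fun x => (PySem.List.count (p ++ [w]) x : Int))) := by
        rw [wrStep]
        simp only [hw, not_true_eq_false, if_false, PySem.List.index?, hi]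
        rw [wr_modify_count w u p i hnd hi']
      have hsub' : ∀ x, x ∈ p ++ [w] → x ∈ u := by
        intro x hx
        rcases List.mem_append.mp hx with h | h
        · exact hsub x h
        · simp at h; exact h ▸ hw
      rw [List.foldl_cons, hstep, ih u (p ++ [w]) hnd hsub']
      simp [hw, List.append_assoc]
    · have hwp : w ∉ p := fun h => hw (hsub w h)
      have hstep : wrStep (u, u.map (fun x => (PySem.List.count p x : Int))) w
          = (u ++ [w], (u ++ [w]).map (fun x => (PySem.List.count (p ++ [w]) x : Int))) := by
        rw [wrStep]
        simp only [hw, not_false_eq_true, if_true]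
        refine Prod.ext rfl ?_
        simp [PySem.List.count, List.count_append]
        constructor
        · intro x hx
          simp [List.count_eq_zero]
          intro h
          exact hw (h ▸ hx)
        · have : List.count w p = 0 := List.count_eq_zero.mpr hwp
          omega
      have hnd' : (u ++ [w]).Nodup := by
        simp [List.nodup_append, hnd]
        intro x hx h
        exact hw (h ▸ hx)
      have hsub' : ∀ x, x ∈ p ++ [w] → x ∈ u ++ [w] := by
        intro x hx
        rcases List.mem_append.mp hx with h | h
        · exact List.mem_append.mpr (Or.inl (hsub x h))
        · exact List.mem_append.mpr (Or.inr h)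
      rw [List.foldl_cons, hstep, ih (u ++ [w]) (p ++ [w]) hnd' hsub']
      simp [hw, List.append_assoc]

-- ===== VERDICT (by name: the statement is the Claim_ definition above) =====
theorem word_repeat_spec : Claim_equal_word_repeat := by
  intro data _
  show word_repeat data = word_repeat_alt data
  have h := wr_loop data [] [] (by simp) (by simp)
  simpa [word_repeat, word_repeat_alt] using h
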